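-- pv_equiv track=rewrite | github.com/agam-lang/benchmarks | suites/01_algorithms/comparisons/quicksort.py | partition_cost
-- ===== SOURCE A (Python) =====
-- def partition_cost(low: int, high: int, pivot: int) -> int:
--     score = 0
--     for i in range(low, high):
--         probe = ((i * 17) + 13) % 997
--         if probe < pivot:
--             score += probe
--         else:
--             score -= probe
--     return score
-- ===== SOURCE B (Python) =====
-- def partition_cost(low: int, high: int, pivot: int) -> int:
--     n = high - low
--     if n <= 0:
--         return 0
--     vals = [p if p < pivot else -p for p in [((r * 17) + 13) % 997 for r in range(997)]]
--     period = sum(vals)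
--     q, rem = divmod(n, 997)
--     start = low % 997
--     tail = 0
--     for k in range(rem):
--         tail += vals[(start + k) % 997]
--     return q * period + tail
-- ===== Notes on version B (the rewrite author's own statement) =====
-- stated objective: faster
-- what changed: B replaces A's loop over every i in range(low, high) by a closed form: the probe sequence has period 997, so B builds the 997-entry signed-probe table once, multiplies its total by the number of full periods, and adds a remainder of at most 996 table lookups.
import Mathlib
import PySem

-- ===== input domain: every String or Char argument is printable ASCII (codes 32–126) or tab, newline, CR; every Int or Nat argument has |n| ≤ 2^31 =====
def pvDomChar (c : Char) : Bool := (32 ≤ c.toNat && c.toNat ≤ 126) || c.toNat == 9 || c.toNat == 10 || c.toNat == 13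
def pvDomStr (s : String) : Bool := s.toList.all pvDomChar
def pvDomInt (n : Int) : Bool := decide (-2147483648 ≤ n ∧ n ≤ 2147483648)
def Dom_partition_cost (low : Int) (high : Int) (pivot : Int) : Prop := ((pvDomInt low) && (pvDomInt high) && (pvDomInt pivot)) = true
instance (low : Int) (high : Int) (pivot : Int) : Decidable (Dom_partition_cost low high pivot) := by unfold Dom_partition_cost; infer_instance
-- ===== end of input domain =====

-- B replaces A's O(high-low) signed-probe loop by a closed form over the period-997 probe
-- table: one per-period sum multiplied by the number of full periods, plus a ≤996-term
-- remainder — O(1) in (high-low); objective: faster (asymptotic).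

-- ===== PORT A =====
def partition_cost (low : Int) (high : Int) (pivot : Int) : Int :=
  (PySem.List.pyRange low high 1).foldl
    (fun score i =>
      let probe := PySem.Int.mod (i * 17 + 13) 997
      if probe < pivot then score + probe else score - probe) 0

-- ===== PORT B =====
-- vals = [p if p < pivot else -p for p in [((r * 17) + 13) % 997 for r in range(997)]]
def pvVals (pivot : Int) : List Int :=
  ((PySem.List.pyRange 0 997 1).map (fun r => PySem.Int.mod (r * 17 + 13) 997)).map
    (fun p => if p < pivot then p else -p)

def partition_cost_alt (low : Int) (high : Int) (pivot : Int) : Int :=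
  let n := high - low
  if n ≤ 0 then 0
  else
    let vals := pvVals pivot
    let period := vals.sum
    let q := PySem.Int.floordiv n 997
    let rem := PySem.Int.mod n 997
    let start := PySem.Int.mod low 997
    let tail := (PySem.List.pyRange 0 rem 1).foldl
      (fun tail k => tail + PySem.List.pyGetD vals (PySem.Int.mod (start + k) 997) 0) 0
    q * period + tail

-- ===== PRECONDITION & SPEC =====
def Spec_partition_cost (low : Int) (high : Int) (pivot : Int) (out : Int) : Prop := out = partition_cost_alt low high pivot
instance (low : Int) (high : Int) (pivot : Int) (out : Int) : Decidable (Spec_partition_cost low high pivot out) := by unfold Spec_partition_cost; infer_instance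

-- ===== CLAIM (what is proved, stated in full; the proofs are below) =====
def Claim_equal_partition_cost : Prop := ∀ (low : Int) (high : Int) (pivot : Int), Dom_partition_cost low high pivot → Spec_partition_cost low high pivot (partition_cost low high pivot)

-- ===== LEMMAS AND PROOFS =====

-- the signed probe value at index i
def pf (pivot i : Int) : Int :=
  let p := (i * 17 + 13) % 997
  if p < pivot then p else -p

-- reference sum: Σ_{k<n} pf pivot (low + k)
def S (pivot : Int) (n : Nat) (low : Int) : Int :=
  ((List.range n).map (fun k : Nat => pf pivot (low + (k : Int)))).sum

theorem pf_congr (pivot i j : Int) (h : i % 997 = j % 997) : pf pivot i = pf pivot j := by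
  have : (i * 17 + 13) % 997 = (j * 17 + 13) % 997 := by omega
  simp [pf, this]

theorem S_succ_left (pivot : Int) (n : Nat) (low : Int) :
    S pivot (n + 1) low = pf pivot low + S pivot n (low + 1) := by
  unfold S
  rw [List.range_succ_eq_map, List.map_cons, List.sum_cons, List.map_map]
  congr 1
  · norm_num
  · refine congrArg List.sum (List.map_congr_left (fun k _ => ?_))
    simp only [Function.comp_def]
    congr 1
    push_cast
    ring

theorem S_split (pivot : Int) (a b : Nat) (low : Int) :
    S pivot (a + b) low = S pivot a low + S pivot b (low + a) := by
  unfold S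
  rw [List.range_add, List.map_append, List.sum_append, List.map_map]
  congr 1
  refine congrArg List.sum (List.map_congr_left (fun k _ => ?_))
  simp only [Function.comp_def]
  congr 1
  push_cast
  ring

theorem S_shift997 (pivot : Int) (n : Nat) (low : Int) :
    S pivot n (low + 997) = S pivot n low := by
  unfold S
  congr 1
  refine List.map_congr_left (fun k _ => ?_)
  exact pf_congr pivot (low + 997 + k) (low + k) (by omega)

theorem S997_succ (pivot low : Int) : S pivot 997 (low + 1) = S pivot 997 low := by
  have h1 : S pivot 997 low = pf pivot low + S pivot 996 (low + 1) := S_succ_left pivot 996 low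
  have h2 : S pivot 997 (low + 1) = S pivot 996 (low + 1) + S pivot 1 (low + 1 + 996) :=
    S_split pivot 996 1 (low + 1)
  have h3 : S pivot 1 (low + 1 + 996) = pf pivot low := by
    simp only [S, List.range_one, List.map_cons, List.map_nil, List.sum_cons, List.sum_nil,
      Nat.cast_zero, add_zero]
    exact pf_congr pivot (low + 1 + 996) low (by omega)
  rw [h2, h3, h1]; ring

theorem S997_const (pivot low : Int) : S pivot 997 low = S pivot 997 0 := by
  induction low using Int.induction_on with
  | zero => rfl
  | succ k ih => rw [S997_succ, ih]
  | pred k ih =>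
    have h := S997_succ pivot (-(k : Int) - 1)
    rw [← h, show -(k : Int) - 1 + 1 = -(k : Int) by ring, ih]

-- A's fold over range(low, high) is the reference sum
theorem foldA (pivot : Int) : ∀ (n : Nat) (low acc : Int),
    (PySem.List.pyRange low (low + n) 1).foldl
      (fun score i =>
        let probe := PySem.Int.mod (i * 17 + 13) 997
        if probe < pivot then score + probe else score - probe) acc
      = acc + S pivot n low := by
  intro n
  induction n with
  | zero => intro low acc; simp [S]
  | succ m ih =>
    intro low acc
    rw [PySem.List.pyRange_one_cons (by push_cast; omega : low < low + ((m + 1 : Nat) : Int))]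
    rw [List.foldl_cons]
    have hstep : (let probe := PySem.Int.mod (low * 17 + 13) 997;
        if probe < pivot then acc + probe else acc - probe) = acc + pf pivot low := by
      simp only [PySem.Int.mod_eq_emod_of_pos (by norm_num : (0:Int) < 997), pf]
      split_ifs <;> ring
    rw [hstep]
    have : low + ((m + 1 : Nat) : Int) = (low + 1) + (m : Nat) := by push_cast; ring
    rw [this, ih (low + 1) (acc + pf pivot low), S_succ_left]
    ring

theorem A_eq_S (low high pivot : Int) :
    partition_cost low high pivot = S pivot (high - low).toNat low := by
  unfold partition_cost
  by_cases h : high ≤ low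
  · rw [PySem.List.pyRange_one_eq_nil h]
    simp [S, show (high - low).toNat = 0 by omega]
  · have hh : high = low + ((high - low).toNat : Int) := by omega
    rw [hh, foldA, zero_add]
    congr 1
    omega

-- the period sum of B's table is S pivot 997 0
theorem vals_sum (pivot : Int) : (pvVals pivot).sum = S pivot 997 0 := by
  unfold pvVals S
  rw [PySem.List.pyRange_one, List.map_map, List.map_map,
    show ((997:Int) - 0).toNat = 997 by decide]
  refine congrArg List.sum (List.map_congr_left (fun k _ => ?_))
  simp only [Function.comp_def, PySem.Int.mod_eq_emod_of_pos (by norm_num : (0:Int) < 997), pf]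

-- B's table lookup at index j ∈ [0,997) is pf pivot j
theorem vals_get (pivot j : Int) (h0 : 0 ≤ j) (h997 : j < 997) :
    PySem.List.pyGetD (pvVals pivot) j 0 = pf pivot j := by
  unfold pvVals
  rw [List.map_map]
  rw [PySem.List.pyGetD_map_pyRange_of_nonneg _ (997 : Int) j 0 h0 h997]
  simp only [Function.comp_def, PySem.Int.mod_eq_emod_of_pos (by norm_num : (0:Int) < 997), pf]

-- B's remainder fold is the reference sum of the first `rem` terms from `low`
theorem foldTail (pivot low : Int) : ∀ (m : Nat) (a acc : Int),
    (PySem.List.pyRange a (a + m) 1).foldl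
      (fun tail k => tail + PySem.List.pyGetD (pvVals pivot) (PySem.Int.mod (low % 997 + k) 997) 0) acc
      = acc + S pivot m (low + a) := by
  intro m
  induction m with
  | zero => intro a acc; simp [S]
  | succ m ih =>
    intro a acc
    rw [PySem.List.pyRange_one_cons (by push_cast; omega : a < a + ((m + 1 : Nat) : Int))]
    rw [List.foldl_cons]
    have hidx : PySem.Int.mod (low % 997 + a) 997 = (low + a) % 997 := by
      rw [PySem.Int.mod_eq_emod_of_pos (by norm_num : (0:Int) < 997)]; omega
    have hget : PySem.List.pyGetD (pvVals pivot) (PySem.Int.mod (low % 997 + a) 997) 0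
        = pf pivot (low + a) := by
      rw [hidx, vals_get pivot _ (by omega) (by omega)]
      exact pf_congr pivot ((low + a) % 997) (low + a) (by omega)
    rw [hget]
    have : a + ((m + 1 : Nat) : Int) = (a + 1) + (m : Nat) := by push_cast; ring
    rw [this, ih (a + 1) (acc + pf pivot (low + a))]
    have : S pivot (m + 1) (low + a) = pf pivot (low + a) + S pivot m (low + a + 1) :=
      S_succ_left pivot m (low + a)
    rw [this]; ring_nf

-- peel q full periods off the reference sum
theorem S_periods (pivot : Int) : ∀ (q r : Nat) (low : Int),
    S pivot (q * 997 + r) low = q * S pivot 997 0 + S pivot r low := by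
  intro q
  induction q with
  | zero => intro r low; simp
  | succ q ih =>
    intro r low
    have h : (q + 1) * 997 + r = 997 + (q * 997 + r) := by ring
    rw [h, S_split pivot 997 (q * 997 + r) low, ih, S997_const]
    push_cast
    rw [S_shift997 pivot r low]
    ring

-- ===== VERDICT (by name: the statement is the Claim_ definition above) =====
theorem partition_cost_spec : Claim_equal_partition_cost := by
  intro low high pivot _
  unfold Spec_partition_cost partition_cost_alt
  by_cases hn : high - low ≤ 0
  · simp only [hn, if_true]
    rw [A_eq_S]
    simp [S, show (high - low).toNat = 0 by omega]
  · simp only [hn, if_false]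
    have hpos : (0:Int) < high - low := by omega
    set n := high - low with hn_def
    have hq := PySem.Int.floordiv_mul_add_mod n 997
    have hq0 : 0 ≤ PySem.Int.floordiv n 997 := by
      rw [PySem.Int.floordiv_eq_ediv_of_pos (by norm_num)]
      exact Int.ediv_nonneg (by omega) (by norm_num)
    have hr0 : 0 ≤ PySem.Int.mod n 997 := PySem.Int.mod_nonneg n (by norm_num)
    have hr997 : PySem.Int.mod n 997 < 997 := PySem.Int.mod_lt n (by norm_num)
    set q := PySem.Int.floordiv n 997 with hqdef
    set r := PySem.Int.mod n 997 with hrdef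
    -- the tail fold
    have ht : (PySem.List.pyRange 0 r 1).foldl
        (fun tail k => tail + PySem.List.pyGetD (pvVals pivot) (PySem.Int.mod (PySem.Int.mod low 997 + k) 997) 0) 0
        = S pivot r.toNat low := by
      have hmodlow : PySem.Int.mod low 997 = low % 997 :=
        PySem.Int.mod_eq_emod_of_pos (by norm_num)
      rw [hmodlow]
      have := foldTail pivot low r.toNat 0 0
      rw [show ((0:Int) + (r.toNat : Int)) = r by omega] at this
      rw [this]
      simp
    rw [ht, A_eq_S, vals_sum]
    have hsplit : (high - low).toNat = q.toNat * 997 + r.toNat := by omega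
    rw [hsplit, S_periods]
    have : ((q.toNat : Int)) = q := by omega
    rw [this]
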